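-- pv_equiv track=rewrite | github.com/mmcknett/advent-of-code-2024 | day-07/day-07.py | possible_results
-- ===== SOURCE A (Python) =====
-- def possible_results(numbers, with_cat=False):
--   if len(numbers) == 0:
--     raise ValueError("Don't call this with an empty list.")
--   if len(numbers) == 1:
--     return set(numbers)
--
--   [*rest, last] = numbers
--   possibles = possible_results(rest, with_cat=with_cat)
--   mults = {last * p for p in possibles}
--   adds = {last + p for p in possibles}
--
--   if with_cat:
--     cats = {concat(p, last) for p in possibles}
--     return cats.union(adds).union(mults)
--
--   return mults.union(adds)
--
-- def concat(a, b):
--   return int(str(a) + str(b))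
-- ===== SOURCE B (Python) =====
-- def possible_results(numbers, with_cat=False):
--   if not numbers:
--     raise ValueError("Don't call this with an empty list.")
--   results = {numbers[0]}
--   for n in numbers[1:]:
--     mults = {p * n for p in results}
--     adds = {p + n for p in results}
--     if with_cat:
--       results = {concat(p, n) for p in results} | adds | mults
--     else:
--       results = mults | adds
--   return results
--
-- def concat(a, b):
--   return int(str(a) + str(b))
-- ===== Notes on version B (the rewrite author's own statement) =====
-- stated objective: simpler
-- what changed: Replaces tail-peeling recursion (which re-derives the prefix set at every level) with a single explicit left-to-right loop that carries one reachable-set accumulator and extends it per element.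
import Mathlib
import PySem

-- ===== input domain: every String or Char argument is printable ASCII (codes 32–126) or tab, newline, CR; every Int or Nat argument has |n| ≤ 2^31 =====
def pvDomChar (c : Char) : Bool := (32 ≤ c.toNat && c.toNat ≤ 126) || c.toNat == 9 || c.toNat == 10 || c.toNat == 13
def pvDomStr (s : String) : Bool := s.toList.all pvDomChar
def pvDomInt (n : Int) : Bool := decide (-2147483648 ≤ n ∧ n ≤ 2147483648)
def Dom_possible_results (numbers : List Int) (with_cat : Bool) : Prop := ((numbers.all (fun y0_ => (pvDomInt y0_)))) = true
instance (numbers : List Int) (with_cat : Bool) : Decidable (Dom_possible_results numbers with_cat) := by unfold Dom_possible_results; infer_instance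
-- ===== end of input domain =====

-- B replaces A's tail-peeling recursion by one explicit left-to-right loop over the tail
-- carrying a single reachable-set accumulator (objective: simpler).

-- ===== PORT A =====
-- concat(a, b) = int(str(a) + str(b)); total form via getD 0 — Pre_ excludes the inputs
-- (negative second argument) where Python's int(...) raises ValueError.
def pvConcat (a b : Int) : Int :=
  (PySem.Int.ofChars? (PySem.Int.toChars a ++ PySem.Int.toChars b)).getD 0

-- A peels the LAST element: '[*rest, last] = numbers' then recurses on rest.  That is
-- structural recursion on the reversed list (numbers.reverse = last :: rest.reverse),
-- which pvRecA transcribes branch for branch; possible_results reverses once and calls it.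
def pvRecA (with_cat : Bool) : List Int → List Int
  | [] => []                                  -- A raises here; excluded by Pre_
  | [x] => [x]                                -- set(numbers) for a singleton
  | last :: r :: restRev =>
    let possibles := pvRecA with_cat (r :: restRev)
    let mults := PySem.Set.ofList (possibles.map (fun p => last * p))
    let adds := PySem.Set.ofList (possibles.map (fun p => last + p))
    if with_cat then
      let cats := PySem.Set.ofList (possibles.map (fun p => pvConcat p last))
      PySem.Set.union (PySem.Set.union cats adds) mults
    else
      PySem.Set.union mults adds

def possible_results (numbers : List Int) (with_cat : Bool) : List Int :=
  pvRecA with_cat numbers.reverse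

-- ===== PORT B =====
def possible_results_alt (numbers : List Int) (with_cat : Bool) : List Int :=
  match numbers with
  | [] => []                                  -- B raises here; excluded by Pre_
  | x :: rest =>
    rest.foldl (fun results n =>
      let mults := PySem.Set.ofList (results.map (fun p => p * n))
      let adds := PySem.Set.ofList (results.map (fun p => p + n))
      if with_cat then
        PySem.Set.union (PySem.Set.union (PySem.Set.ofList (results.map (fun p => pvConcat p n))) adds) mults
      else
        PySem.Set.union mults adds)
      (PySem.Set.ofList [x])

-- ===== PRECONDITION & SPEC =====
-- Pre_ excludes exactly the inputs where the Python A raises ValueError: the empty list,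
-- and (when with_cat) a list whose tail contains a negative number, since
-- concat(p, last) = int(str(p) + str(last)) raises for negative last.
def Pre_possible_results (numbers : List Int) (with_cat : Bool) : Prop :=
  numbers ≠ [] ∧ (with_cat = true → ∀ n ∈ numbers.tail, 0 ≤ n)
instance (numbers : List Int) (with_cat : Bool) : Decidable (Pre_possible_results numbers with_cat) := by unfold Pre_possible_results; infer_instance

def pvWitness_possible_results : List Int × Bool := ([15, 6, 2], true)

def Spec_possible_results (numbers : List Int) (with_cat : Bool) (out : List Int) : Prop := out = possible_results_alt numbers with_cat
instance (numbers : List Int) (with_cat : Bool) (out : List Int) : Decidable (Spec_possible_results numbers with_cat out) := by unfold Spec_possible_results; infer_instance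

-- ===== CLAIM (what is proved, stated in full; the proofs are below) =====
def Claim_equal_possible_results : Prop := ∀ (numbers : List Int) (with_cat : Bool), Dom_possible_results numbers with_cat → Pre_possible_results numbers with_cat → Spec_possible_results numbers with_cat (possible_results numbers with_cat)

-- ===== LEMMAS AND PROOFS =====

-- B's per-element step, named for the proofs.
def pvStepB (with_cat : Bool) (results : List Int) (n : Int) : List Int :=
  let mults := PySem.Set.ofList (results.map (fun p => p * n))
  let adds := PySem.Set.ofList (results.map (fun p => p + n))
  if with_cat then
    PySem.Set.union (PySem.Set.union (PySem.Set.ofList (results.map (fun p => pvConcat p n))) adds) mults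
  else
    PySem.Set.union mults adds

theorem pvAlt_eq_foldl (x : Int) (rest : List Int) (w : Bool) :
    possible_results_alt (x :: rest) w = rest.foldl (pvStepB w) [x] := rfl

-- peeling the last element in A equals one B-step (A's last*p / last+p vs B's p*n / p+n commute)
theorem pvRecA_peel (w : Bool) (n y : Int) (ys : List Int) :
    pvRecA w (n :: y :: ys) = pvStepB w (pvRecA w (y :: ys)) n := by
  have hm : (fun p => n * p) = (fun p : Int => p * n) := funext fun p => Int.mul_comm n p
  have ha : (fun p => n + p) = (fun p : Int => p + n) := funext fun p => Int.add_comm n p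
  simp only [pvRecA, pvStepB, hm, ha]

theorem pvA_eq_foldl (x : Int) (rest : List Int) (w : Bool) :
    pvRecA w (x :: rest).reverse = rest.foldl (pvStepB w) [x] := by
  induction rest using List.reverseRecOn with
  | nil => simp [pvRecA]
  | append_singleton r n ih =>
    have hrev : (x :: (r ++ [n])).reverse = n :: (x :: r).reverse := by simp
    rw [hrev]
    rcases hx : (x :: r).reverse with _ | ⟨y, ys⟩
    · simp at hx
    · rw [pvRecA_peel, ← hx, ih, List.foldl_append]
      simp

-- ===== VERDICT (by name: the statement is the Claim_ definition above) =====
theorem possible_results_spec : Claim_equal_possible_results := by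
  intro numbers w _ hpre
  rcases numbers with _ | ⟨x, rest⟩
  · exact absurd rfl hpre.1
  · show possible_results (x :: rest) w = possible_results_alt (x :: rest) w
    rw [possible_results, pvA_eq_foldl, pvAlt_eq_foldl]
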